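-- pv_equiv track=rewrite | github.com/rxy007/python_code | compression/slc.py | slc
-- ===== SOURCE A (Python) =====
-- def slc(s):
--     s_list = []
--     i = 0
--     while i<len(s):
--         counter = 0
--         c = s[i]
--         k = c
--         if 48 <= ord(k) <= 57:
--             k = chr(97 + ord(k) - 48)
--         else:
--             k = chr(ord(k) + 10)
--         if i < len(s) - 1:
--             for j in range(i+1, len(s)):
--                 if c != s[j]:
--                     counter = j
--                     break
--             else:
--                 counter = j+1
--             if counter > i+1:
--                 s_list.append(str(counter-i) + k)
--             else:
--                 s_list.append(k)
--             i = counter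
--         else:
--             s_list.append(k)
--             i = len(s)
--     return ''.join(s_list)
-- ===== SOURCE B (Python) =====
-- def slc(s):
--     # Build run-length pairs in one pass over the characters, then format each run.
--     runs = []  # list of [ch, count]
--     for ch in s:
--         if runs and runs[-1][0] == ch:
--             runs[-1][1] += 1
--         else:
--             runs.append([ch, 1])
--     parts = []
--     for ch, n in runs:
--         k = chr(97 + ord(ch) - 48) if '0' <= ch <= '9' else chr(ord(ch) + 10)
--         parts.append((str(n) if n > 1 else '') + k)
--     return ''.join(parts)
-- ===== Notes on version B (the rewrite author's own statement) =====
-- stated objective: simpler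
-- what changed: Replaced A's while-loop with index jumping and an inner for/break/else scan to find each run's end by a single left-to-right pass that accumulates (char,count) runs, followed by a formatting pass over the runs.
import Mathlib
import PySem

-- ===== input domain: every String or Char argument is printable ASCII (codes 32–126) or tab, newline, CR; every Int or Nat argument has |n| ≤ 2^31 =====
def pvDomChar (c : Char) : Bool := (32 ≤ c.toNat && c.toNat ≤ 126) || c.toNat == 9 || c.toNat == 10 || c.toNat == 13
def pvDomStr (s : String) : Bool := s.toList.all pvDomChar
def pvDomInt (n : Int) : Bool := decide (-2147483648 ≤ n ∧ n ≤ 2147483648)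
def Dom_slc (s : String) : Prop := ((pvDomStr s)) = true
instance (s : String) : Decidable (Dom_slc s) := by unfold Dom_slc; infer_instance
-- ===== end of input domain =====

-- B replaces A's index-jumping scan (inner for-loop to find the end of each run) by a single
-- left-to-right pass that accumulates (char, count) runs, then formats them (objective: simpler).

-- ===== PORT A =====
-- k = chr(97+ord(c)-48) if digit else chr(ord(c)+10)
def slcMapA (c : Char) : Char :=
  if 48 ≤ c.toNat ∧ c.toNat ≤ 57 then Char.ofNat (97 + c.toNat - 48)
  else Char.ofNat (c.toNat + 10)

-- the inner 'for j in range(i+1, len(s)) … break/else': first j ≥ start with s[j] ≠ c, else len(s)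
def slcFind (s : List Char) (c : Char) (j : Nat) : Nat :=
  if h : j < s.length then
    if s[j] ≠ c then j else slcFind s c (j + 1)
  else j
termination_by s.length - j

theorem slcFind_ge (s : List Char) (c : Char) (j : Nat) : j ≤ slcFind s c j := by
  unfold slcFind
  split
  · split
    · exact Nat.le_refl j
    · exact Nat.le_trans (Nat.le_succ j) (slcFind_ge s c (j + 1))
  · exact Nat.le_refl j
termination_by s.length - j

-- the outer while loop of A
def slcLoop (s : List Char) (i : Nat) (acc : List String) : List String :=
  if h : i < s.length then
    let c := s[i]
    let k := slcMapA c
    if i < s.length - 1 then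
      let counter := slcFind s c (i + 1)
      let acc' := if counter > i + 1 then acc ++ [toString (counter - i) ++ k.toString]
                  else acc ++ [k.toString]
      slcLoop s counter acc'
    else acc ++ [k.toString]
  else acc
termination_by s.length - i
decreasing_by
  have : i + 1 ≤ slcFind s s[i] (i + 1) := slcFind_ge s s[i] (i + 1)
  omega

def slc (s : String) : String := String.join (slcLoop s.toList 0 [])

-- ===== PORT B =====
def slcMapB (c : Char) : Char :=
  if 48 ≤ c.toNat ∧ c.toNat ≤ 57 then Char.ofNat (97 + c.toNat - 48)
  else Char.ofNat (c.toNat + 10)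

-- 'runs[-1]' mutation / append: the head of this list is the last run (list kept reversed)
def slcAddRun (runs : List (Char × Nat)) (ch : Char) : List (Char × Nat) :=
  match runs with
  | (c, n) :: rest => if c = ch then (c, n + 1) :: rest else (ch, 1) :: (c, n) :: rest
  | [] => [(ch, 1)]

def slcPart (c : Char) (n : Nat) : String :=
  (if n > 1 then toString n else "") ++ (slcMapB c).toString

def slc_alt (s : String) : String :=
  let runs := (s.toList.foldl slcAddRun []).reverse
  String.join (runs.map (fun p => slcPart p.1 p.2))

-- ===== PRECONDITION & SPEC =====
def Spec_slc (s : String) (out : String) : Prop := out = slc_alt s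
instance (s : String) (out : String) : Decidable (Spec_slc s out) := by unfold Spec_slc; infer_instance

-- ===== CLAIM (what is proved, stated in full; the proofs are below) =====
def Claim_equal_slc : Prop := ∀ (s : String), Dom_slc s → Spec_slc s (slc s)

-- ===== LEMMAS AND PROOFS =====

-- canonical run-length decomposition both programs compute
def slcRle : List Char → List (Char × Nat)
  | [] => []
  | c :: rest =>
      (c, 1 + (rest.takeWhile (· == c)).length) :: slcRle (rest.dropWhile (· == c))
termination_by l => l.length
decreasing_by
  have := List.length_dropWhile_le (p := (· == c)) (l := rest)
  simp; omega

theorem slcFind_spec (s : List Char) (c : Char) (j : Nat) :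
    slcFind s c j = j + ((s.drop j).takeWhile (· == c)).length := by
  unfold slcFind
  split
  · rename_i h
    rw [List.drop_eq_getElem_cons h]
    by_cases hc : s[j] = c
    · simp [hc, slcFind_spec s c (j + 1)]
      omega
    · simp [hc]
  · rename_i h
    rw [List.drop_eq_nil_of_le (by omega)]
    simp
termination_by s.length - j

theorem drop_takeWhile_len (l : List Char) (p : Char → Bool) :
    l.drop (l.takeWhile p).length = l.dropWhile p := by
  induction l with
  | nil => simp
  | cons x xs ih =>
    by_cases hp : p x
    · simp [hp, ih]
    · simp [hp]

theorem slcLoop_spec (s : List Char) (i : Nat) (acc : List String) :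
    slcLoop s i acc = acc ++ (slcRle (s.drop i)).map (fun p => slcPart p.1 p.2) := by
  unfold slcLoop
  split
  · rename_i h
    have hdrop : s.drop i = s[i] :: s.drop (i + 1) := List.drop_eq_getElem_cons h
    by_cases hlast : i < s.length - 1
    · simp only [hlast, if_pos]
      have hfind := slcFind_spec s s[i] (i + 1)
      set t := ((s.drop (i + 1)).takeWhile (· == s[i])).length with ht
      have hge : i + 1 ≤ slcFind s s[i] (i + 1) := slcFind_ge s s[i] (i + 1)
      rw [slcLoop_spec s (slcFind s s[i] (i + 1))]
      have h2 := drop_takeWhile_len (s.drop (i + 1)) (· == s[i])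
      rw [List.drop_drop, ← ht] at h2
      have hdrop2 : s.drop (slcFind s s[i] (i + 1)) = (s.drop (i + 1)).dropWhile (· == s[i]) := by
        rw [hfind]; exact h2
      rw [hdrop2, hdrop, slcRle, List.map_cons, ← ht]
      by_cases hgt : slcFind s s[i] (i + 1) > i + 1
      · rw [if_pos hgt]
        simp only [List.append_assoc, List.cons_append, List.nil_append]
        congr 2
        unfold slcPart
        rw [if_pos (show 1 + t > 1 from by omega), hfind,
          show i + 1 + t - i = 1 + t from by omega]
        rfl
      · have ht0 : t = 0 := by omega
        rw [if_neg hgt]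
        simp only [List.append_assoc, List.cons_append, List.nil_append]
        congr 2
        unfold slcPart
        rw [ht0]
        simp
        rfl
    · -- last character: drop (i+1) = [] so the run has length 1
      have hnil : s.drop (i + 1) = [] := List.drop_eq_nil_of_le (by omega)
      rw [if_neg hlast, hdrop, hnil, slcRle]
      simp [slcRle, slcPart, slcMapA, slcMapB]
      rfl
  · rename_i h
    rw [List.drop_eq_nil_of_le (by omega), slcRle]
    simp
termination_by s.length - i
decreasing_by
  have := slcFind_ge s s[i] (i + 1)
  omega

theorem slcAddRun_spec (l : List Char) : ∀ (c : Char) (n : Nat) (acc : List (Char × Nat)),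
    List.foldl slcAddRun ((c, n) :: acc) l =
      (slcRle (l.dropWhile (· == c))).reverse ++ (c, n + (l.takeWhile (· == c)).length) :: acc := by
  induction l with
  | nil => intro c n acc; simp [slcRle]
  | cons x xs ih =>
    intro c n acc
    by_cases hx : x = c
    · subst hx
      rw [List.foldl_cons, show slcAddRun ((x, n) :: acc) x = (x, n + 1) :: acc from by
        simp [slcAddRun]]
      rw [ih x (n + 1) acc]
      simp
      omega
    · rw [List.foldl_cons, show slcAddRun ((c, n) :: acc) x = (x, 1) :: (c, n) :: acc from by
        simp [slcAddRun, Ne.symm hx]]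
      rw [ih x 1 ((c, n) :: acc)]
      rw [List.takeWhile_cons_of_neg (by simp [hx]), List.dropWhile_cons_of_neg (by simp [hx])]
      rw [slcRle]
      simp

theorem slcFold_rle (l : List Char) : (List.foldl slcAddRun [] l).reverse = slcRle l := by
  cases l with
  | nil => simp [slcRle]
  | cons c cs =>
    simp only [List.foldl_cons, slcAddRun]
    rw [slcAddRun_spec cs c 1 []]
    rw [slcRle]
    simp

-- ===== VERDICT (by name: the statement is the Claim_ definition above) =====
theorem slc_spec : Claim_equal_slc := by
  intro s _
  unfold Spec_slc slc slc_alt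
  rw [slcLoop_spec, slcFold_rle]
  simp
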